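-- pv_equiv track=rewrite | github.com/Mouret-Orfeu/Projet-Code-circulaire | src/main.py | get_nod_and_edge_tetra
-- ===== SOURCE A (Python) =====
-- len_tetra = 4
--
-- def get_nod_and_edge_tetra(tetra):
--     nods = set()
--     edges = set()
--     for slice_idx in range(1,len_tetra):
--
--         first_slice = tetra[0:slice_idx]
--         second_slice = tetra[slice_idx:]
--
--         nods.add(first_slice)
--         if slice_idx == 2:
--             #On évite de remettre un noeud qui est déjà dans le graphe (par ex pour "AAAA", on ne met pas 2 fois le noeud "AA" dans nods)
--             if second_slice != first_slice:
--                 nods.add(second_slice)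
--         else:
--             nods.add(second_slice)
--         edges.add((first_slice, second_slice))
--     return nods, edges
-- ===== SOURCE B (Python) =====
-- len_tetra = 4
--
-- def get_nod_and_edge_tetra(tetra):
--     def walk(pre, suf, steps, nods, edges):
--         if steps == 0:
--             return nods, edges
--         nods.add(pre)
--         nods.add(suf)
--         edges.add((pre, suf))
--         return walk(pre + suf[:1], suf[1:], steps - 1, nods, edges)
--     return walk(tetra[:1], tetra[1:], len_tetra - 1, set(), set())
-- ===== Notes on version B (the rewrite author's own statement) =====
-- stated objective: alternative
-- what changed: B replaces A's indexed range loop over three slices of tetra (with its slice_idx==2 duplicate-check special case) by a tail-recursive walk that never re-slices tetra: it keeps two rotating accumulators pre/suf, at each step records (pre, suf) and moves one character from the front of suf onto pre, with no index and no special case.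
import Mathlib
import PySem

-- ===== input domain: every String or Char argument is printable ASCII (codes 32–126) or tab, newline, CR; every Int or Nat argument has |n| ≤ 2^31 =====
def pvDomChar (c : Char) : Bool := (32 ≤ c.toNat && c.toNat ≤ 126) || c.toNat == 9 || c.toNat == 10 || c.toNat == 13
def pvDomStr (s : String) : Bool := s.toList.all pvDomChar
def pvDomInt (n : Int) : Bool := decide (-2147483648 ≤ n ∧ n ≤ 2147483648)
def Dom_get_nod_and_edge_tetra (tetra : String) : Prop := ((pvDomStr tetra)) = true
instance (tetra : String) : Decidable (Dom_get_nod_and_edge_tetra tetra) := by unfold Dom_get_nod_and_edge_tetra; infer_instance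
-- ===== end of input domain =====

-- B replaces A's indexed slice loop (and its slice_idx==2 special case) by a tail-recursive
-- walk with two rotating accumulators that moves one character per step (objective: alternative).


-- ===== PORT A =====
def get_nod_and_edge_tetra (tetra : String) : List String × (List (String × String)) :=
  let r := (PySem.List.pyRange 1 4).foldl
    (fun (st : PySem.Set String × PySem.Set (String × String)) slice_idx =>
      let first_slice := PySem.Str.slice tetra (some 0) (some slice_idx)
      let second_slice := PySem.Str.slice tetra (some slice_idx) none
      let nods := st.1.add first_slice
      let nods := if slice_idx == 2 then
          (if second_slice ≠ first_slice then nods.add second_slice else nods)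
        else nods.add second_slice
      (nods, st.2.add (first_slice, second_slice)))
    (PySem.Set.empty, PySem.Set.empty)
  (r.1, r.2)

-- ===== PORT B =====
-- walk(pre, suf, steps, nods, edges): B's inner tail recursion; the steps counter goes
-- 3, 2, 1, 0 in Python, so Nat fuel is exact here.  Python's string concatenation
-- 'pre + suf[:1]' is ported exactly as String.ofList of the concatenated code-point lists.
def pvWalkB (pre suf : String) (steps : Nat) (nods : PySem.Set String)
    (edges : PySem.Set (String × String)) : List String × (List (String × String)) :=
  match steps with
  | 0 => (nods, edges)
  | steps + 1 =>
    let nods := (nods.add pre).add suf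
    let edges := edges.add (pre, suf)
    pvWalkB (String.ofList (pre.toList ++ (PySem.Str.slice suf none (some 1)).toList))
            (PySem.Str.slice suf (some 1) none) steps nods edges

def get_nod_and_edge_tetra_alt (tetra : String) : List String × (List (String × String)) :=
  pvWalkB (PySem.Str.slice tetra none (some 1)) (PySem.Str.slice tetra (some 1) none)
    (4 - 1) PySem.Set.empty PySem.Set.empty

-- ===== PRECONDITION & SPEC =====
def Spec_get_nod_and_edge_tetra (tetra : String) (out : List String × (List (String × String))) : Prop := out = get_nod_and_edge_tetra_alt tetra
instance (tetra : String) (out : List String × (List (String × String))) : Decidable (Spec_get_nod_and_edge_tetra tetra out) := by unfold Spec_get_nod_and_edge_tetra; infer_instance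

-- ===== CLAIM (what is proved, stated in full; the proofs are below) =====
def Claim_equal_get_nod_and_edge_tetra : Prop := ∀ (tetra : String), Dom_get_nod_and_edge_tetra tetra → Spec_get_nod_and_edge_tetra tetra (get_nod_and_edge_tetra tetra)

-- ===== LEMMAS AND PROOFS =====

-- adding an element already in the set is a no-op
theorem pv_add_of_mem {α : Type} [BEq α] [LawfulBEq α] (s : PySem.Set α) (x : α)
    (h : x ∈ s) : s.add x = s := by
  simp [PySem.Set.add, PySem.Set.contains, h]

-- the i = 2 conditional of A is the unconditional add: when second = first, first was just added
theorem pv_cond_add (nods : PySem.Set String) (first second : String) :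
    (if second ≠ first then (nods.add first).add second else nods.add first)
      = (nods.add first).add second := by
  by_cases h : second = first
  · subst h
    rw [if_neg (by simp), pv_add_of_mem (nods.add second) second (by simp [PySem.Set.mem_add])]
  · simp [h]

-- A's first slice s[0:i] is s[:i]
theorem pv_slice0 (tetra : String) (i : Int) :
    PySem.Str.slice tetra (some 0) (some i) = PySem.Str.slice tetra none (some i) := by
  simp [PySem.Str.slice]

-- rotating one character: (s[k:])[1:] = s[k+1:] for k = 1, 2
theorem pv_suf_step1 (s : String) :
    PySem.Str.slice (PySem.Str.slice s (some 1) none) (some 1) none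
      = PySem.Str.slice s (some 2) none := by
  simp only [PySem.Str.slice, PySem.Chars.slice, String.toList_ofList]
  refine congrArg String.ofList ?_
  rw [show (1:Int) = ((1:Nat):Int) by norm_num, show (2:Int) = ((2:Nat):Int) by norm_num,
    PySem.List.slice_from_natCast, PySem.List.slice_from_natCast, PySem.List.slice_from_natCast,
    List.drop_drop]

theorem pv_suf_step2 (s : String) :
    PySem.Str.slice (PySem.Str.slice s (some 2) none) (some 1) none
      = PySem.Str.slice s (some 3) none := by
  simp only [PySem.Str.slice, PySem.Chars.slice, String.toList_ofList]
  refine congrArg String.ofList ?_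
  rw [show (1:Int) = ((1:Nat):Int) by norm_num, show (2:Int) = ((2:Nat):Int) by norm_num,
    show (3:Int) = ((3:Nat):Int) by norm_num,
    PySem.List.slice_from_natCast, PySem.List.slice_from_natCast, PySem.List.slice_from_natCast,
    List.drop_drop]

-- rotating one character: s[:k] + (s[k:])[:1] = s[:k+1] for k = 1, 2
theorem pv_pre_step1 (s : String) :
    String.ofList ((PySem.Str.slice s none (some 1)).toList ++
        (PySem.Str.slice (PySem.Str.slice s (some 1) none) none (some 1)).toList)
      = PySem.Str.slice s none (some 2) := by
  simp only [PySem.Str.slice, PySem.Chars.slice, String.toList_ofList]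
  refine congrArg String.ofList ?_
  rw [show (1:Int) = ((1:Nat):Int) by norm_num, show (2:Int) = ((2:Nat):Int) by norm_num,
    PySem.List.slice_from_natCast, PySem.List.slice_to_natCast, PySem.List.slice_to_natCast,
    PySem.List.slice_to_natCast, ← List.take_add]

theorem pv_pre_step2 (s : String) :
    String.ofList ((PySem.Str.slice s none (some 2)).toList ++
        (PySem.Str.slice (PySem.Str.slice s (some 2) none) none (some 1)).toList)
      = PySem.Str.slice s none (some 3) := by
  simp only [PySem.Str.slice, PySem.Chars.slice, String.toList_ofList]
  refine congrArg String.ofList ?_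
  rw [show (1:Int) = ((1:Nat):Int) by norm_num, show (2:Int) = ((2:Nat):Int) by norm_num,
    show (3:Int) = ((3:Nat):Int) by norm_num,
    PySem.List.slice_from_natCast, PySem.List.slice_to_natCast, PySem.List.slice_to_natCast,
    PySem.List.slice_to_natCast, ← List.take_add]

-- ===== VERDICT (by name: the statement is the Claim_ definition above) =====
set_option maxHeartbeats 1000000 in
theorem get_nod_and_edge_tetra_spec : Claim_equal_get_nod_and_edge_tetra := by
  intro tetra _
  unfold Spec_get_nod_and_edge_tetra get_nod_and_edge_tetra get_nod_and_edge_tetra_alt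
  have hr : PySem.List.pyRange 1 4 = [1, 2, 3] := by rfl
  simp only [hr, List.foldl, pvWalkB, pv_slice0]
  rw [pv_suf_step1, pv_pre_step1, pv_suf_step2, pv_pre_step2]
  simp only [show ((1 : Int) == 2) = false from by decide, show ((2 : Int) == 2) = true from by decide,
    show ((3 : Int) == 2) = false from by decide, Bool.false_eq_true, if_false, if_true]
  rw [pv_cond_add]
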